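-- pv_equiv track=rewrite | github.com/krosct/CFB_Chemical-Formula-Balancer | src/main.py | splitElements
-- ===== SOURCE A (Python) =====
-- def splitElements(molecules: list[str]):
--     elements = []
--
--     for molecule in molecules:
--         temp = []
--         element = ""
--         for char in molecule:
--             if char.isupper():
--                 temp.append(element)
--                 element = char
--             else:
--                 element += char
--         temp.append(element)
--         elements.append(temp)
--
--     for i in range(len(molecules)):
--         elements[i].pop(0)
--
--     return elements
-- ===== SOURCE B (Python) =====
-- def splitElements(molecules: list[str]):
--     # Index-table-then-slice: find the start index of every element (the
--     # uppercase positions), then cut the molecule between consecutive starts.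
--     # Chars before the first uppercase are dropped automatically, so A's
--     # pop(0) fix-up pass never exists.
--     def parse(molecule):
--         bounds = [i for i, c in enumerate(molecule) if c.isupper()]
--         bounds.append(len(molecule))
--         return [molecule[bounds[j]:bounds[j + 1]] for j in range(len(bounds) - 1)]
--     return [parse(m) for m in molecules]
-- ===== Notes on version B (the rewrite author's own statement) =====
-- stated objective: alternative
-- what changed: Replaces A's running-accumulator scan plus a second pop(0) fix-up pass with a two-stage index-table decomposition: first tabulate the uppercase start indices via enumerate, then slice each molecule between consecutive start indices, so the spurious leading chunk never exists.
import Mathlib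
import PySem

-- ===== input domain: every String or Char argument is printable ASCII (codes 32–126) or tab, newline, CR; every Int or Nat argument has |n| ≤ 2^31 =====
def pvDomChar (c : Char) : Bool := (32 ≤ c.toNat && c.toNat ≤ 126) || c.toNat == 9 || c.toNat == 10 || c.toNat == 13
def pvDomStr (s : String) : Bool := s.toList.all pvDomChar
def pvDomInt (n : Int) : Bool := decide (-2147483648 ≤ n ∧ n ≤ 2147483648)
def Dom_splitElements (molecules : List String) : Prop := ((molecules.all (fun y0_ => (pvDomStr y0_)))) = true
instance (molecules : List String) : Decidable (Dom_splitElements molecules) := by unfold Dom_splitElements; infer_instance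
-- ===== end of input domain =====

-- B replaces A's running-accumulator pass plus pop(0) fix-up with an
-- uppercase-index table and slicing between consecutive starts (alternative
-- decomposition, same cost).

-- ===== PORT A =====
-- A scans each molecule left-to-right with a running `element` accumulator,
-- appends the (possibly empty) leading chunk too, and removes it afterwards
-- with pop(0).  Strings are carried as List Char (PySem convention); pop(0)
-- on the always-nonempty inner list is `drop 1`.
def splitAStep (st : List String × List Char) (c : Char) : List String × List Char :=
  if PySem.Chars.isupper c then (st.1 ++ [String.ofList st.2], [c]) else (st.1, st.2 ++ [c])

def splitAOne (molecule : String) : List String :=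
  let st := molecule.toList.foldl splitAStep ([], [])
  st.1 ++ [String.ofList st.2]

def splitElements (molecules : List String) : List (List String) :=
  let elements := molecules.foldl (fun acc molecule => acc ++ [splitAOne molecule]) []
  -- second Python loop: for i in range(len(molecules)): elements[i].pop(0)
  elements.map (fun l => l.drop 1)

-- ===== PORT B =====
-- B first tabulates the start index of every element (the uppercase positions,
-- via PySem.List.enumerate), appends the terminal index len(molecule), and then
-- slices the molecule between consecutive indices with PySem.List.slice;
-- iterating j over consecutive pairs bounds[j], bounds[j+1] is bs.zip bs.tail.
def splitBOne (molecule : String) : List String :=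
  let cs := molecule.toList
  let bounds := ((PySem.List.enumerate cs 0).filter (fun p => PySem.Chars.isupper p.2)).map (fun p => p.1)
  let bs := bounds ++ [PySem.List.len cs]
  (bs.zip bs.tail).map (fun p => String.ofList (PySem.List.slice cs (some p.1) (some p.2)))

def splitElements_alt (molecules : List String) : List (List String) :=
  molecules.map splitBOne

-- ===== PRECONDITION & SPEC =====
def Spec_splitElements (molecules : List String) (out : List (List String)) : Prop := out = splitElements_alt molecules
instance (molecules : List String) (out : List (List String)) : Decidable (Spec_splitElements molecules out) := by unfold Spec_splitElements; infer_instance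

-- ===== CLAIM (what is proved, stated in full; the proofs are below) =====
def Claim_equal_splitElements : Prop := ∀ (molecules : List String), Dom_splitElements molecules → Spec_splitElements molecules (splitElements molecules)

-- ===== LEMMAS AND PROOFS =====

-- proof-only reference: the grouping A's per-molecule pass computes
def pvG (e : List Char) : List Char → List String
  | [] => [String.ofList e]
  | c :: cs => if PySem.Chars.isupper c then String.ofList e :: pvG [c] cs else pvG (e ++ [c]) cs

-- proof-only reference: pvG with the leading chunk already removed
def pvGroups : List Char → List String
  | [] => []
  | c :: cs => if PySem.Chars.isupper c then pvG [c] cs else pvGroups cs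

-- proof-only abbreviations for B's pieces, parameterised by the absolute start index
def pvBounds (d : List Char) (s : Nat) : List Nat :=
  (((d.drop s).zipIdx s).filter (fun p => PySem.Chars.isupper p.1)).map (fun p => p.2)

def pvSliceMap (d : List Char) (bs : List Nat) : List String :=
  (bs.zip bs.tail).map (fun p => String.ofList ((d.drop p.1).take (p.2 - p.1)))

theorem pvA_char (cs : List Char) : ∀ (t : List String) (e : List Char),
    (cs.foldl splitAStep (t, e)).1 ++ [String.ofList (cs.foldl splitAStep (t, e)).2] = t ++ pvG e cs := by
  induction cs with
  | nil => intro t e; simp [pvG]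
  | cons c cs ih =>
    intro t e
    simp only [List.foldl_cons, splitAStep, pvG]
    by_cases h : PySem.Chars.isupper c <;> simp [h, ih]

theorem pvG_drop (cs : List Char) : ∀ (e : List Char), (pvG e cs).drop 1 = pvGroups cs := by
  induction cs with
  | nil => intro e; simp [pvG, pvGroups]
  | cons c cs ih =>
    intro e
    simp only [pvG, pvGroups]
    by_cases h : PySem.Chars.isupper c <;> simp [h, ih]

theorem pvDrop_cons {d : List Char} {s : Nat} {c : Char} {t : List Char}
    (h : d.drop s = c :: t) : d.drop (s + 1) = t := by
  rw [← List.drop_drop, h]; rfl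

theorem pvTake_extend {d : List Char} {s j : Nat} {c : Char} {t : List Char}
    (hjs : j ≤ s) (h : d.drop s = c :: t) :
    (d.drop j).take (s - j) ++ [c] = (d.drop j).take (s + 1 - j) := by
  have h0 : d[s]? = some c := by
    have h1 := congrArg (fun l => l[0]?) h
    simpa [List.getElem?_drop] using h1
  have hget : (d.drop j)[s - j]? = some c := by
    rw [List.getElem?_drop]
    have hj : j + (s - j) = s := by omega
    rw [hj]; exact h0
  have : s + 1 - j = (s - j) + 1 := by omega
  rw [this, List.take_add_one, hget]
  rfl

theorem pvG_slice (d : List Char) : ∀ (t : List Char) (s j : Nat), d.drop s = t → j ≤ s →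
    pvG ((d.drop j).take (s - j)) t = pvSliceMap d (j :: (pvBounds d s ++ [d.length])) := by
  intro t
  induction t with
  | nil =>
    intro s j ht hjs
    have hlen : d.length ≤ s := List.drop_eq_nil_iff.mp ht
    have h1 : (d.drop j).take (s - j) = d.drop j :=
      List.take_of_length_le (by simp; omega)
    have h2 : (d.drop j).take (d.length - j) = d.drop j :=
      List.take_of_length_le (by simp)
    simp [pvG, pvBounds, pvSliceMap, ht, h1, h2]
  | cons c t ih =>
    intro s j ht hjs
    have ht' : d.drop (s + 1) = t := pvDrop_cons ht
    have hb : pvBounds d s =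
        (if PySem.Chars.isupper c then [s] else []) ++ pvBounds d (s + 1) := by
      simp only [pvBounds, ht, ht', List.zipIdx_cons, List.filter_cons]
      by_cases h : PySem.Chars.isupper c <;> simp [h]
    simp only [pvG]
    by_cases h : PySem.Chars.isupper c
    · have hc : [c] = (d.drop s).take (s + 1 - s) := by
        rw [ht]; simp
      rw [hb]
      simp only [h, if_pos]
      have := ih (s + 1) s ht' (by omega)
      rw [hc] at *
      rw [this]
      simp [pvSliceMap]
    · rw [hb]
      simp only [h, if_neg, Bool.false_eq_true, not_false_iff, List.nil_append]
      rw [pvTake_extend hjs ht]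
      exact ih (s + 1) j ht' (by omega)

theorem pvGroups_slice (d : List Char) : ∀ (t : List Char) (s : Nat), d.drop s = t →
    pvGroups t = pvSliceMap d (pvBounds d s ++ [d.length]) := by
  intro t
  induction t with
  | nil =>
    intro s ht
    simp [pvGroups, pvBounds, pvSliceMap, ht]
  | cons c t ih =>
    intro s ht
    have ht' : d.drop (s + 1) = t := pvDrop_cons ht
    have hb : pvBounds d s =
        (if PySem.Chars.isupper c then [s] else []) ++ pvBounds d (s + 1) := by
      simp only [pvBounds, ht, ht', List.zipIdx_cons, List.filter_cons]
      by_cases h : PySem.Chars.isupper c <;> simp [h]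
    simp only [pvGroups]
    by_cases h : PySem.Chars.isupper c
    · rw [hb]
      simp only [h, if_pos]
      have hc : [c] = (d.drop s).take (s + 1 - s) := by rw [ht]; simp
      rw [hc, pvG_slice d t (s + 1) s ht' (by omega)]
      simp
    · rw [hb]
      simp only [h, Bool.false_eq_true, if_false, List.nil_append]
      exact ih (s + 1) ht'

-- proof-only explicit Nat→Int cast (avoids list-level coercion elaboration)
def pvCast (n : Nat) : Int := Int.ofNat n

-- B's enumerate-built Int bound list is the Nat index table pvBounds, cast
theorem pvEnumBounds (cs : List Char) : ∀ (k : Nat),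
    ((PySem.List.enumerate cs (pvCast k)).filter (fun p => PySem.Chars.isupper p.2)).map (fun p => p.1)
      = (((cs.zipIdx k).filter (fun p => PySem.Chars.isupper p.1)).map (fun p => p.2)).map pvCast := by
  induction cs with
  | nil => intro k; simp [PySem.List.enumerate_nil]
  | cons c cs ih =>
    intro k
    rw [PySem.List.enumerate_cons, List.zipIdx_cons]
    simp only [List.filter_cons]
    have hsucc : pvCast k + 1 = pvCast (k + 1) := by simp [pvCast]
    by_cases h : PySem.Chars.isupper c
    · simp [h, hsucc, ih (k + 1)]
    · simp [h, hsucc, ih (k + 1)]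

theorem pvCastZip (L : List Nat) (f : Int × Int → String) :
    ((L.map pvCast).zip (L.map pvCast).tail).map f
      = (L.zip L.tail).map (fun p => f (pvCast p.1, pvCast p.2)) := by
  rw [← List.map_tail, List.zip_map, List.map_map]
  refine List.map_congr_left (fun p _ => ?_)
  cases p
  rfl

theorem pvB_slice (m : String) :
    splitBOne m = pvSliceMap m.toList (pvBounds m.toList 0 ++ [m.toList.length]) := by
  have hb := pvEnumBounds m.toList 0
  rw [show pvCast 0 = 0 from rfl] at hb
  unfold splitBOne pvSliceMap
  dsimp only
  rw [hb,
      show PySem.List.len m.toList = pvCast m.toList.length by simp [PySem.List.len_eq, pvCast],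
      show (((m.toList.zipIdx 0).filter (fun p => PySem.Chars.isupper p.1)).map (fun p => p.2)).map
            pvCast ++ [pvCast m.toList.length]
        = (pvBounds m.toList 0 ++ [m.toList.length]).map pvCast from by
        simp [pvBounds],
      pvCastZip]
  unfold pvBounds
  rw [List.drop_zero]
  refine List.map_congr_left (fun p _ => ?_)
  have : ∀ (n : Nat), pvCast n = (n : Int) := fun n => rfl
  simp [this, PySem.List.slice_natCast]

theorem pvOne (m : String) : (splitAOne m).drop 1 = splitBOne m := by
  have hA : splitAOne m = pvG [] m.toList := by
    simpa using pvA_char m.toList [] []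
  rw [hA, pvG_drop, pvGroups_slice m.toList m.toList 0 (by simp), pvB_slice]

-- ===== VERDICT (by name: the statement is the Claim_ definition above) =====
theorem splitElements_spec : Claim_equal_splitElements := by
  intro molecules _
  unfold Spec_splitElements splitElements splitElements_alt
  rw [PySem.List.foldl_append_singleton_eq_map]
  simp only [List.map_map, List.nil_append, Function.comp_def]
  refine List.map_congr_left (fun m _ => ?_)
  rw [← pvOne, List.drop_one]
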